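-- pv_equiv track=rewrite | github.com/kazukiii1128-del/Twitter | tools/sync_influencer_notion.py | _build_prefixed_headers
-- ===== SOURCE A (Python) =====
-- def _build_prefixed_headers(cat_row, col_row):
--     """Build headers with category prefixes to handle duplicate column names.
--     E.g., '@ID (link)' appears under TikTok, Instagram, YouTube ->
--     'TikTok:@ID (link)', 'Instagram:@ID (link)', 'YouTube:@ID (link)'
--     """
--     headers = []
--     seen = {}
--     current_cat = ""
--
--     for i in range(len(col_row)):
--         if i < len(cat_row) and cat_row[i].strip():
--             current_cat = cat_row[i].strip().replace("\n", " ")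
--         col_name = col_row[i].strip().replace("\n", " ")
--
--         if not col_name:
--             headers.append("")
--             continue
--
--         # Check if this column name already appeared
--         if col_name in seen:
--             # Prefix with category
--             prefixed = f"{current_cat}:{col_name}" if current_cat else col_name
--             headers.append(prefixed)
--         else:
--             headers.append(col_name)
--         seen[col_name] = seen.get(col_name, 0) + 1
--
--     return headers
-- ===== SOURCE B (Python) =====
-- def _build_prefixed_headers(cat_row, col_row):
--     def norm(s):
--         return s.strip().replace("\n", " ")
--
--     def cat_at(i):
--         # last non-blank category cell at or before index i (scanned backwards)
--         for j in range(min(i, len(cat_row) - 1), -1, -1):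
--             if cat_row[j].strip():
--                 return norm(cat_row[j])
--         return ""
--
--     names = [norm(c) for c in col_row]
--     out = []
--     for i, nm in enumerate(names):
--         if not nm:
--             out.append("")
--         elif names.index(nm) == i:
--             out.append(nm)
--         else:
--             c = cat_at(i)
--             out.append(f"{c}:{nm}" if c else nm)
--     return out
-- ===== Notes on version B (the rewrite author's own statement) =====
-- stated objective: alternative
-- what changed: A's single stateful pass (running seen-counter dict + mutable current category) is replaced by a completely stateless per-index formulation: duplicates are detected with names.index (first-occurrence scan) and the category is found by scanning cat_row backwards from each index, with no dictionary and no carried state at all; this trades O(n) with a hash dict for O(n^2) direct scans.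
import Mathlib
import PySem

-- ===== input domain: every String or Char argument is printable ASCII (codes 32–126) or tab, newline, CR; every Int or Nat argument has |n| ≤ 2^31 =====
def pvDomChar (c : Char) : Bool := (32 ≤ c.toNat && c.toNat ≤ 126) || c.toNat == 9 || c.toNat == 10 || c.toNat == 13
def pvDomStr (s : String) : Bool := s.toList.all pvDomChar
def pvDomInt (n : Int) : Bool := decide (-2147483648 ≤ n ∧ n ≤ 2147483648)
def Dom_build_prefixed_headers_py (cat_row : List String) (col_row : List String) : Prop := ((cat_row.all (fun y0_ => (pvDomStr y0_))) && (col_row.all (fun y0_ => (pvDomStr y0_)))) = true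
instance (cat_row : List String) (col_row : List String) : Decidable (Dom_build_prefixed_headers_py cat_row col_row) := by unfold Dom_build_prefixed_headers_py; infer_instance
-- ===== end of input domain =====

-- B replaces A's stateful pass (seen-counter dict + mutable current category) by a stateless
-- per-index formulation: duplicate detection via names.index and a backward scan of cat_row
-- for the category — no dictionary, no carried state (objective: alternative; not faster).

-- ===== PORT A =====
-- helper: the body of A's for-loop (state = (headers, seen, current_cat))
def bphA_step (cat_row col_row : List String)
    (st : List String × PySem.Dict String Int × String) (i : Nat) :
    List String × PySem.Dict String Int × String :=
  let cur :=
    if i < cat_row.length ∧ PySem.Str.strip (cat_row.getD i "") ≠ "" then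
      PySem.Str.replace (PySem.Str.strip (cat_row.getD i "")) "\n" " "
    else st.2.2
  let colName := PySem.Str.replace (PySem.Str.strip (col_row.getD i "")) "\n" " "
  if colName = "" then (st.1 ++ [""], st.2.1, cur)
  else
    let hdrs :=
      if st.2.1.contains colName then
        st.1 ++ [if cur ≠ "" then cur ++ ":" ++ colName else colName]
      else st.1 ++ [colName]
    (hdrs, st.2.1.insert colName (st.2.1.getD colName 0 + 1), cur)

-- literal transliteration of A: one loop over range(len(col_row)) carrying (headers, seen, current_cat)
def build_prefixed_headers_py (cat_row : List String) (col_row : List String) : List String :=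
  ((List.range col_row.length).foldl (bphA_step cat_row col_row)
    ([], PySem.Dict.empty, "")).1

-- ===== PORT B =====
-- helper: norm(s) = s.strip().replace("\n", " ")
def bphB_norm (s : String) : String := PySem.Str.replace (PySem.Str.strip s) "\n" " "

-- helper: B's backward for-loop with early return ('for j in range(min(i, len-1), -1, -1): if
-- cat_row[j].strip(): return norm(cat_row[j])'), ported as downward structural recursion; exact:
-- when cat_row is empty the scan starts at getD 0 "" whose strip is "" — same '' as the empty loop.
def bphB_catScan (cat_row : List String) : Nat → String
  | 0 => if PySem.Str.strip (cat_row.getD 0 "") ≠ "" then bphB_norm (cat_row.getD 0 "") else ""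
  | j+1 => if PySem.Str.strip (cat_row.getD (j+1) "") ≠ "" then bphB_norm (cat_row.getD (j+1) "")
           else bphB_catScan cat_row j

-- helper: cat_at(i)
def bphB_catAt (cat_row : List String) (i : Nat) : String :=
  bphB_catScan cat_row (min i (cat_row.length - 1))

-- transliteration of B: names list, then a pure per-index comprehension using names.index and cat_at
def build_prefixed_headers_py_alt (cat_row : List String) (col_row : List String) : List String :=
  let names := col_row.map bphB_norm
  (List.range names.length).map (fun i =>
    let nm := names.getD i ""
    if nm = "" then ""
    else if PySem.List.index? names nm = some i then nm
    else
      let c := bphB_catAt cat_row i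
      if c ≠ "" then c ++ ":" ++ nm else nm)

-- ===== PRECONDITION & SPEC =====
def Spec_build_prefixed_headers_py (cat_row : List String) (col_row : List String) (out : List String) : Prop := out = build_prefixed_headers_py_alt cat_row col_row
instance (cat_row : List String) (col_row : List String) (out : List String) : Decidable (Spec_build_prefixed_headers_py cat_row col_row out) := by unfold Spec_build_prefixed_headers_py; infer_instance

-- ===== CLAIM (what is proved, stated in full; the proofs are below) =====
def Claim_equal_build_prefixed_headers_py : Prop := ∀ (cat_row : List String) (col_row : List String), Dom_build_prefixed_headers_py cat_row col_row → Spec_build_prefixed_headers_py cat_row col_row (build_prefixed_headers_py cat_row col_row)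

-- ===== LEMMAS AND PROOFS =====

-- normalized name at index i (total via getD; "" outside the list)
def pvNm (col_row : List String) (i : Nat) : String :=
  PySem.Str.replace (PySem.Str.strip (col_row.getD i "")) "\n" " "

-- forward-filled category after processing indices 0..k-1 (A's current_cat)
def pvCur (cat_row : List String) : Nat → String
  | 0 => ""
  | k + 1 =>
    if k < cat_row.length ∧ PySem.Str.strip (cat_row.getD k "") ≠ "" then
      PySem.Str.replace (PySem.Str.strip (cat_row.getD k "")) "\n" " "
    else pvCur cat_row k

-- A's seen-dict after k steps
def pvSeenStep (col_row : List String) (d : PySem.Dict String Int) (i : Nat) :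
    PySem.Dict String Int :=
  if pvNm col_row i = "" then d
  else d.insert (pvNm col_row i) (d.getD (pvNm col_row i) 0 + 1)

def pvSeen (col_row : List String) (k : Nat) : PySem.Dict String Int :=
  (List.range k).foldl (pvSeenStep col_row) PySem.Dict.empty

-- A's output at index i, in closed form
def pvOutA (cat_row col_row : List String) (i : Nat) : String :=
  if pvNm col_row i = "" then ""
  else if (pvSeen col_row i).contains (pvNm col_row i) then
    (if pvCur cat_row (i + 1) ≠ "" then pvCur cat_row (i + 1) ++ ":" ++ pvNm col_row i
     else pvNm col_row i)
  else pvNm col_row i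

theorem pvNames_getD (col_row : List String) (i : Nat) :
    (col_row.map bphB_norm).getD i "" = pvNm col_row i := by
  by_cases h : i < col_row.length
  · simp [bphB_norm, pvNm, List.getD_eq_getElem?_getD, List.getElem?_map,
      List.getElem?_eq_getElem h]
  · have h1 : (col_row.map bphB_norm).getD i "" = "" := by
      simp [List.getD_eq_getElem?_getD, List.getElem?_eq_none (by simpa using Nat.le_of_not_lt h)]
    have h2 : (col_row).getD i "" = "" := by
      simp [List.getD_eq_getElem?_getD, List.getElem?_eq_none (Nat.le_of_not_lt h)]
    rw [h1, pvNm, h2]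
    decide

theorem pvSeen_succ (col_row : List String) (m : Nat) :
    pvSeen col_row (m + 1) = pvSeenStep col_row (pvSeen col_row m) m := by
  unfold pvSeen
  rw [List.range_succ, List.foldl_append, List.foldl_cons, List.foldl_nil]

theorem pvSeen_contains (col_row : List String) :
    ∀ (k : Nat) (s : String),
      (pvSeen col_row k).contains s = true ↔ s ≠ "" ∧ ∃ j < k, pvNm col_row j = s := by
  intro k
  induction k with
  | zero => intro s; simp [pvSeen, PySem.Dict.contains_empty]
  | succ m ih =>
    intro s
    rw [pvSeen_succ]
    unfold pvSeenStep
    by_cases hm : pvNm col_row m = ""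
    · rw [if_pos hm, ih s]
      constructor
      · rintro ⟨hs, j, hj, hjs⟩; exact ⟨hs, j, Nat.lt_succ_of_lt hj, hjs⟩
      · rintro ⟨hs, j, hj, hjs⟩
        refine ⟨hs, j, ?_, hjs⟩
        rcases Nat.lt_succ_iff_lt_or_eq.mp hj with h | h
        · exact h
        · exact absurd hjs (by rw [h, hm]; exact fun e => hs e.symm)
    · rw [if_neg hm, PySem.Dict.contains_insert, Bool.or_eq_true, beq_iff_eq, ih s]
      constructor
      · rintro (h | ⟨hs, j, hj, hjs⟩)
        · exact ⟨h ▸ hm, m, Nat.lt_succ_self m, h.symm⟩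
        · exact ⟨hs, j, Nat.lt_succ_of_lt hj, hjs⟩
      · rintro ⟨hs, j, hj, hjs⟩
        rcases Nat.lt_succ_iff_lt_or_eq.mp hj with h | h
        · exact Or.inr ⟨hs, j, h, hjs⟩
        · exact Or.inl (by rw [← hjs, h])

theorem pvA_state (cat_row col_row : List String) :
    ∀ (k : Nat),
      (List.range k).foldl (bphA_step cat_row col_row) ([], PySem.Dict.empty, "")
      = ((List.range k).map (pvOutA cat_row col_row), pvSeen col_row k, pvCur cat_row k) := by
  intro k
  induction k with
  | zero => simp [pvSeen, pvCur]
  | succ m ih =>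
    rw [List.range_succ, List.foldl_append, List.foldl_cons, List.foldl_nil, ih,
      List.map_append]
    unfold bphA_step
    have hnm : PySem.Str.replace (PySem.Str.strip (col_row.getD m "")) "\n" " "
        = pvNm col_row m := rfl
    have hcur :
        (if m < cat_row.length ∧ PySem.Str.strip (cat_row.getD m "") ≠ "" then
          PySem.Str.replace (PySem.Str.strip (cat_row.getD m "")) "\n" " "
        else pvCur cat_row m) = pvCur cat_row (m + 1) := rfl
    simp only [hnm, hcur]
    by_cases hm : pvNm col_row m = ""
    · rw [if_pos hm, pvSeen_succ]
      unfold pvSeenStep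
      rw [if_pos hm]
      simp [pvOutA, hm]
    · rw [if_neg hm, pvSeen_succ]
      unfold pvSeenStep
      rw [if_neg hm]
      by_cases hc : (pvSeen col_row m).contains (pvNm col_row m) = true
      · simp only [hc, if_true]
        simp [pvOutA, hm, hc]
      · simp only [hc, Bool.false_eq_true, if_false]
        simp [pvOutA, hm, hc]

-- pvCur is constant past the end of cat_row
theorem pvCur_ge (cat_row : List String) :
    ∀ (d : Nat), pvCur cat_row (cat_row.length + d) = pvCur cat_row cat_row.length := by
  intro d
  induction d with
  | zero => rfl
  | succ e ih =>
    have h1 : cat_row.length + (e + 1) = (cat_row.length + e) + 1 := by omega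
    rw [h1]
    conv_lhs => rw [pvCur]
    rw [if_neg (by omega : ¬ (cat_row.length + e < cat_row.length ∧
      PySem.Str.strip (cat_row.getD (cat_row.length + e) "") ≠ ""))]
    exact ih

-- B's backward scan equals A's forward-filled category
theorem pvCatAt_eq (cat_row : List String) :
    ∀ (i : Nat), bphB_catAt cat_row i = pvCur cat_row (i + 1) := by
  intro i
  induction i using Nat.strong_induction_on with
  | _ i ih =>
    by_cases hi : i < cat_row.length
    · have hmin : min i (cat_row.length - 1) = i := by omega
      unfold bphB_catAt
      rw [hmin]
      cases i with
      | zero =>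
        unfold bphB_catScan
        conv_rhs => rw [pvCur]
        by_cases h0 : PySem.Str.strip (cat_row.getD 0 "") ≠ ""
        · rw [if_pos h0, if_pos ⟨hi, h0⟩]
          rfl
        · rw [if_neg h0, if_neg (by tauto)]
          rfl
      | succ j =>
        have hj := ih j (by omega)
        unfold bphB_catAt at hj
        rw [show min j (cat_row.length - 1) = j from by omega] at hj
        unfold bphB_catScan
        by_cases h0 : PySem.Str.strip (cat_row.getD (j+1) "") ≠ ""
        · rw [if_pos h0]
          show bphB_norm _ = pvCur cat_row (j + 1 + 1)
          unfold pvCur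
          rw [if_pos ⟨hi, h0⟩]
          rfl
        · rw [if_neg h0, hj]
          show pvCur cat_row (j + 1) = pvCur cat_row (j + 1 + 1)
          conv_rhs => unfold pvCur
          rw [if_neg (by tauto)]
    · -- i ≥ cat_row.length
      by_cases hz : cat_row.length = 0
      · -- empty cat_row: both sides are ""
        have hnil : cat_row = [] := List.length_eq_zero_iff.mp hz
        subst hnil
        unfold bphB_catAt
        have : min i (([] : List String).length - 1) = 0 := by simp
        rw [this]
        have hscan : bphB_catScan ([] : List String) 0 = "" := by
          unfold bphB_catScan
          rw [if_neg (by decide)]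
        rw [hscan]
        -- pvCur [] (i+1) = ""
        clear this hscan hi hz ih
        induction i with
        | zero => rfl
        | succ j ihj =>
          unfold pvCur
          rw [if_neg (by simp)]
          exact ihj
      · -- nonempty cat_row, i ≥ length: scan from length-1
        have hlen : 0 < cat_row.length := Nat.pos_of_ne_zero hz
        have hmin : min i (cat_row.length - 1) = cat_row.length - 1 := by omega
        unfold bphB_catAt
        rw [hmin]
        have hprev := ih (cat_row.length - 1) (by omega)
        unfold bphB_catAt at hprev
        rw [show min (cat_row.length - 1) (cat_row.length - 1) = cat_row.length - 1 from by omega] at hprev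
        rw [hprev]
        have h1 : cat_row.length - 1 + 1 = cat_row.length := by omega
        rw [h1]
        have h2 : i + 1 = cat_row.length + (i + 1 - cat_row.length) := by omega
        rw [h2, pvCur_ge]

-- names.index(names[i]) == i iff no earlier occurrence
theorem pvIndex_iff (names : List String) (i : Nat) (hi : i < names.length) :
    PySem.List.index? names names[i] = some i ↔ ∀ j, (hj : j < i) → names[j] ≠ names[i] := by
  constructor
  · intro h j hj
    obtain ⟨hk, _, hmin⟩ := PySem.List.getElem_of_index?_eq_some h
    exact hmin j (by omega)
  · intro hmin
    rw [PySem.List.index?_eq_some_iff]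
    refine ⟨names.take i, names.drop (i + 1), ?_, ?_, ?_⟩
    · conv_lhs => rw [← List.take_append_drop i names]
      congr 1
      exact (List.getElem_cons_drop hi).symm
    · exact List.length_take_of_le (by omega)
    · intro hmem
      obtain ⟨j, hjlt, hje⟩ := List.mem_iff_getElem.mp hmem
      have hjlen : j < i := by
        have := hjlt
        simp [List.length_take] at this
        omega
      have : names[j]'(by omega) = names[i] := by
        rw [← hje, List.getElem_take]
      exact hmin j hjlen this

-- names[j] = pvNm j for j < length
theorem pvNames_getElem (col_row : List String) (j : Nat) (hj : j < col_row.length) :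
    (col_row.map bphB_norm)[j]'(by simpa using hj) = pvNm col_row j := by
  simp [bphB_norm, pvNm, List.getD_eq_getElem?_getD, List.getElem?_eq_getElem hj]

-- pointwise agreement of the two outputs
theorem pvPointwise (cat_row col_row : List String) (i : Nat) (hi : i < col_row.length) :
    pvOutA cat_row col_row i
      = (let names := col_row.map bphB_norm
         let nm := names.getD i ""
         if nm = "" then ""
         else if PySem.List.index? names nm = some i then nm
         else
           let c := bphB_catAt cat_row i
           if c ≠ "" then c ++ ":" ++ nm else nm) := by
  simp only [pvNames_getD]
  have hlen : i < (col_row.map bphB_norm).length := by simpa using hi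
  have hni : (col_row.map bphB_norm)[i]'hlen = pvNm col_row i := pvNames_getElem col_row i hi
  unfold pvOutA
  by_cases hm : pvNm col_row i = ""
  · rw [if_pos hm, if_pos hm]
  · rw [if_neg hm, if_neg hm]
    by_cases hdup : ∃ j < i, pvNm col_row j = pvNm col_row i
    · have hcont : (pvSeen col_row i).contains (pvNm col_row i) = true := by
        rw [pvSeen_contains]; exact ⟨hm, hdup⟩
      rw [if_pos hcont]
      have hne : ¬ PySem.List.index? (col_row.map bphB_norm) (pvNm col_row i) = some i := by
        intro h
        rw [← hni] at h
        obtain ⟨j, hj, hje⟩ := hdup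
        exact (pvIndex_iff _ i hlen).mp h j hj
          ((pvNames_getElem col_row j (by omega)).trans (hje.trans hni.symm))
      rw [if_neg hne, pvCatAt_eq]
    · have hncont : ¬ (pvSeen col_row i).contains (pvNm col_row i) = true := by
        rw [pvSeen_contains]; rintro ⟨_, h⟩; exact hdup h
      rw [if_neg hncont]
      have heq : PySem.List.index? (col_row.map bphB_norm) (pvNm col_row i) = some i := by
        rw [← hni, pvIndex_iff _ i hlen]
        intro j hj hje
        exact hdup ⟨j, hj, (pvNames_getElem col_row j (by omega)).symm.trans (hje.trans hni)⟩
      rw [if_pos heq]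

-- ===== VERDICT (by name: the statement is the Claim_ definition above) =====
theorem build_prefixed_headers_py_spec : Claim_equal_build_prefixed_headers_py := by
  intro cat_row col_row _
  unfold Spec_build_prefixed_headers_py
  have ha : build_prefixed_headers_py cat_row col_row
      = (List.range col_row.length).map (pvOutA cat_row col_row) := by
    unfold build_prefixed_headers_py
    rw [pvA_state]
  rw [ha]
  unfold build_prefixed_headers_py_alt
  simp only [List.length_map]
  exact List.map_congr_left (fun i hi =>
    pvPointwise cat_row col_row i (List.mem_range.mp hi))
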